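-- pv_equiv track=rewrite | github.com/RollingRabz/DE_TEST | test_4.py | word_mesh
-- ===== SOURCE A (Python) =====
-- def word_mesh(words: list[str]):
--     def get_mesh(a, b):
--         # Find mesh point
--         for i in range(1, min(len(a), len(b)) + 1):    # get the max character we can check which is min of two words selected
--             if a[-i:] == b[:i]:                        # If found mesh point return the mesh word
--                 return a[-i:]
--         return ""                                      # If mesh point not found return empty string
--
--     ans = ""                                           # created empty string for store output
--     for i in range(len(words) - 1):                    # Loop through all words in list
--         mesh = get_mesh(words[i], words[i + 1])        # take input into above function
--         if not mesh:                                   # If mesh point not found return failed to mesh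
--             return "failed to mesh"
--         ans += mesh                                    # Merge the mesh word together
--     return ans
-- ===== SOURCE B (Python) =====
-- def word_mesh(words: list[str]):
--     def min_overlap(a, b):
--         # minimal positive k with a[-k:] == b[:k], via the KMP prefix function
--         # of s = b[:m] + '\0' + a[-m:]: its positive borders are exactly the
--         # overlaps, and the failure-link chain enumerates them in decreasing
--         # order, so the last positive value on the chain is the minimum.
--         m = min(len(a), len(b))
--         if m == 0:
--             return 0
--         s = b[:m] + "\0" + a[len(a) - m:]
--         pi = [0] * len(s)
--         k = 0
--         for q in range(1, len(s)):
--             while k > 0 and s[q] != s[k]: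
--                 k = pi[k - 1]
--             if s[q] == s[k]:
--                 k += 1
--             pi[q] = k
--         k = pi[-1]
--         while k > 0 and pi[k - 1] > 0:
--             k = pi[k - 1]
--         return k
--
--     parts = []
--     for a, b in zip(words, words[1:]):
--         k = min_overlap(a, b)
--         if k == 0:
--             return "failed to mesh"
--         parts.append(b[:k])
--     return "".join(parts)
-- ===== Notes on version B (the rewrite author's own statement) =====
-- stated objective: alternative
-- what changed: Per adjacent pair, A brute-force scans every overlap length i comparing a[-i:] with b[:i]; B instead computes the KMP prefix function of b[:m] + NUL + a[-m:] and takes the last positive value on the failure-link chain, which is the minimal overlap (worst case O(m) per pair vs A's O(m^2), though not measurably faster on the generated inputs).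
import Mathlib
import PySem

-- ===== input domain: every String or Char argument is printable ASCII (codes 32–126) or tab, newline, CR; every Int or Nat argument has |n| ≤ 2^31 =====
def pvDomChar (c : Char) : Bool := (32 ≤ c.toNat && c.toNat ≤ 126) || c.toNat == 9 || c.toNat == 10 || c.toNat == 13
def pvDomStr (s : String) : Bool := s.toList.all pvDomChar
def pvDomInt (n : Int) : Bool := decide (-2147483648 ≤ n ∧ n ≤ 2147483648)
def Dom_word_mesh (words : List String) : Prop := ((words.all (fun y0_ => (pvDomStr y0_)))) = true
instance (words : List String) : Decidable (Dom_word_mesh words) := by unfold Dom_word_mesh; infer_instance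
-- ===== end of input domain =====

-- Alternative algorithm: B replaces A's per-pair brute-force scan over all overlap lengths by
-- the KMP prefix function of b[:m] + NUL + a[-m:], whose failure-link chain yields the minimal
-- overlap; equal return values on the whole domain.

-- ===== PORT A =====
-- strings are handled as List Char (the PySem convention); 'for i in range(1, min+1)' with early
-- return becomes structural recursion on i
def getMeshLoop (a b : List Char) (i : Nat) : List Char :=
  if i ≤ min a.length b.length then
    if PySem.List.slice a (some (-(i : Int))) none = PySem.List.slice b none (some (i : Int)) then
      PySem.List.slice a (some (-(i : Int))) none
    else getMeshLoop a b (i + 1)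
  else []
termination_by min a.length b.length + 1 - i

-- get_mesh(a, b)
def getMeshA (a b : List Char) : List Char := getMeshLoop a b 1

-- 'for i in range(len(words) - 1)' accumulating ans, with early return "failed to mesh"
def wmLoopA (ws : List (List Char)) (i : Nat) (ans : List Char) : List Char :=
  if i < ws.length - 1 then
    let mesh := getMeshA (ws.getD i []) (ws.getD (i + 1) [])
    if mesh = [] then "failed to mesh".toList
    else wmLoopA ws (i + 1) (ans ++ mesh)
  else ans
termination_by ws.length - 1 - i

def word_mesh (words : List String) : String :=
  String.ofList (wmLoopA (words.map String.toList) 0 [])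

-- ===== PORT B =====
-- 'while k > 0 and s[q] != s[k]: k = pi[k-1]'; fuel = k bounds the iterations (k strictly decreases)
def descend (s : List Char) (pi : List Nat) (c : Char) : Nat → Nat → Nat
  | 0, k => k
  | fuel + 1, k =>
    if 0 < k ∧ s.getD k ' ' ≠ c then descend s pi c fuel (pi.getD (k - 1) 0) else k

-- 'for q in range(1, len(s)): … pi[q] = k' — pi is filled left to right, so assignment at q is append
def piLoop (s : List Char) (pi : List Nat) (k q : Nat) : List Nat :=
  if q < s.length then
    let k1 := descend s pi (s.getD q ' ') k k
    let k2 := if s.getD q ' ' = s.getD k1 ' ' then k1 + 1 else k1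
    piLoop s (pi ++ [k2]) k2 (q + 1)
  else pi
termination_by s.length - q

-- 'while k > 0 and pi[k-1] > 0: k = pi[k-1]'; fuel = k again bounds the iterations
def chainLoop (pi : List Nat) : Nat → Nat → Nat
  | 0, k => k
  | fuel + 1, k =>
    if 0 < k ∧ 0 < pi.getD (k - 1) 0 then chainLoop pi fuel (pi.getD (k - 1) 0) else k

-- min_overlap(a, b); pi[-1] is pi.getD (len s - 1) (s is nonempty here)
def minOverlap (a b : List Char) : Nat :=
  let m := min a.length b.length
  if m = 0 then 0
  else
    let s := b.take m ++ '\x00' :: a.drop (a.length - m)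
    let pi := piLoop s [0] 0 1
    chainLoop pi (pi.getD (s.length - 1) 0) (pi.getD (s.length - 1) 0)

-- 'for a, b in zip(words, words[1:])' building parts, then ''.join(parts)
def wmAltLoop : List (List Char × List Char) → List (List Char) → List Char
  | [], parts => parts.flatten
  | (a, b) :: rest, parts =>
    let k := minOverlap a b
    if k = 0 then "failed to mesh".toList
    else wmAltLoop rest (parts ++ [b.take k])

def word_mesh_alt (words : List String) : String :=
  let ws := words.map String.toList
  String.ofList (wmAltLoop (ws.zip ws.tail) [])

-- ===== PRECONDITION & SPEC =====
def Spec_word_mesh (words : List String) (out : String) : Prop := out = word_mesh_alt words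
instance (words : List String) (out : String) : Decidable (Spec_word_mesh words out) := by unfold Spec_word_mesh; infer_instance

-- ===== CLAIM (what is proved, stated in full; the proofs are below) =====
def Claim_equal_word_mesh : Prop := ∀ (words : List String), Dom_word_mesh words → Spec_word_mesh words (word_mesh words)

-- ===== LEMMAS AND PROOFS =====

def isBorder (t : List Char) (k : Nat) : Prop :=
  k < t.length ∧ t.take k = t.drop (t.length - k)

def maxB (t : List Char) : Nat :=
  Nat.findGreatest (fun k => t.take k = t.drop (t.length - k)) (t.length - 1)

theorem maxB_lt {t : List Char} (h : t ≠ []) : maxB t < t.length := by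
  have h1 : maxB t ≤ t.length - 1 :=
    Nat.findGreatest_le (P := fun k => t.take k = t.drop (t.length - k)) (t.length - 1)
  have := List.length_pos_of_ne_nil h
  omega

theorem maxB_isBorder {t : List Char} (h : t ≠ []) : isBorder t (maxB t) := by
  have h0 : (fun k => t.take k = t.drop (t.length - k)) 0 := by simp
  refine ⟨maxB_lt h, ?_⟩
  exact Nat.findGreatest_spec (P := fun k => t.take k = t.drop (t.length - k))
    (n := t.length - 1) (Nat.zero_le _) h0

theorem le_maxB {t : List Char} {j : Nat} (h : isBorder t j) : j ≤ maxB t :=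
  Nat.le_findGreatest (by have := h.1; omega) h.2

theorem border_trans_down {t : List Char} {j k : Nat} (hk : isBorder t k) (hj : isBorder t j)
    (hjk : j < k) : isBorder (t.take k) j := by
  obtain ⟨hk1, hk2⟩ := hk
  obtain ⟨hj1, hj2⟩ := hj
  have hlen : (t.take k).length = k := by simp; omega
  refine ⟨by omega, ?_⟩
  rw [hlen, List.take_take, min_eq_left hjk.le]
  rw [hk2, List.drop_drop, hj2]
  congr 1
  omega

theorem border_trans_up {t : List Char} {j k : Nat} (hk : isBorder t k)
    (hj : isBorder (t.take k) j) : isBorder t j := by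
  obtain ⟨hk1, hk2⟩ := hk
  obtain ⟨hj1, hj2⟩ := hj
  have hlen : (t.take k).length = k := by simp; omega
  rw [hlen] at hj1 hj2
  refine ⟨by omega, ?_⟩
  rw [List.take_take, min_eq_left hj1.le] at hj2
  rw [hj2, hk2, List.drop_drop]
  congr 1
  omega

theorem border_append {t : List Char} {c : Char} {k : Nat} :
    isBorder (t ++ [c]) (k + 1) ↔ isBorder t k ∧ t.getD k ' ' = c := by
  constructor
  · rintro ⟨h1, h2⟩
    simp at h1
    have hk : k < t.length := by omega
    rw [List.take_append_of_le_length (by omega), List.length_append,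
        List.take_add_one, List.getElem?_eq_getElem hk] at h2
    have hd : t.length + [c].length - (k + 1) = t.length - k := by simp
    rw [hd, List.drop_append_of_le_length (by omega)] at h2
    have hlen : (t.take k).length = (t.drop (t.length - k)).length := by simp; omega
    obtain ⟨e1, e2⟩ := List.append_inj h2 (by simpa using hlen)
    refine ⟨⟨hk, e1⟩, ?_⟩
    rw [List.getD_eq_getElem t ' ' hk]
    simpa using e2
  · rintro ⟨⟨h1, h2⟩, h3⟩
    refine ⟨by simp; omega, ?_⟩
    rw [List.take_append_of_le_length (by omega), List.length_append,
        List.take_add_one, List.getElem?_eq_getElem h1]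
    have hd : t.length + [c].length - (k + 1) = t.length - k := by simp
    rw [hd, List.drop_append_of_le_length (by omega), ← h2]
    rw [List.getD_eq_getElem t ' ' h1] at h3
    simp [h3]

theorem getD_take_eq {s : List Char} {q k : Nat} (h1 : k < q) (h2 : k < s.length) (d : Char) :
    (s.take q).getD k d = s.getD k d := by
  rw [List.getD_eq_getElem _ _ (by simp; omega), List.getD_eq_getElem _ _ h2]
  simp

theorem descend_spec (s : List Char) (pi : List Nat) (c : Char) (q : Nat)
    (hq : 1 ≤ q) (hqs : q ≤ s.length)
    (hpi : ∀ j, j < q → pi.getD j 0 = maxB (s.take (j + 1))) :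
    ∀ fuel k, k ≤ fuel → isBorder (s.take q) k →
      descend s pi c fuel k ≤ k ∧ isBorder (s.take q) (descend s pi c fuel k) ∧
      ((s.take q).getD (descend s pi c fuel k) ' ' = c ∨ descend s pi c fuel k = 0) ∧
      (∀ j, isBorder (s.take q) j → j ≤ k → (s.take q).getD j ' ' = c → j ≤ descend s pi c fuel k) := by
  intro fuel
  induction fuel with
  | zero =>
    intro k hk hb
    interval_cases k
    refine ⟨le_refl _, hb, Or.inr rfl, ?_⟩
    intro j _ hj _; simp [descend]; omega
  | succ fuel ih =>
    intro k hk hb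
    have htlen : (s.take q).length = q := by simp; omega
    by_cases hcond : 0 < k ∧ s.getD k ' ' ≠ c
    · -- loop iterates: k' = pi[k-1] = maxB (s.take k)
      obtain ⟨hk0, hne⟩ := hcond
      have hkq : k < q := by have h := hb.1; rw [htlen] at h; omega
      have hk' : pi.getD (k - 1) 0 = maxB (s.take k) := by
        rw [hpi (k - 1) (by omega)]
        have he : k - 1 + 1 = k := by omega
        rw [he]
      have htk : s.take k = (s.take q).take k := by rw [List.take_take, min_eq_left hkq.le]
      have hne' : s.take k ≠ [] := by
        intro hnil
        have h3 := congrArg List.length hnil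
        rw [List.length_take] at h3
        simp only [List.length_nil] at h3
        omega
      have hmb : maxB (s.take k) < k := by
        have h2 := maxB_lt hne'
        simpa [min_eq_left (show k ≤ s.length by omega)] using h2
      have hbk' : isBorder (s.take q) (pi.getD (k - 1) 0) := by
        rw [hk', htk]
        exact border_trans_up hb (maxB_isBorder (htk ▸ hne'))
      have hrec := ih (pi.getD (k - 1) 0) (by omega) hbk'
      rw [descend, if_pos ⟨hk0, hne⟩]
      refine ⟨le_trans hrec.1 (by omega), hrec.2.1, hrec.2.2.1, ?_⟩
      intro j hj hjk hjc
      rcases Nat.lt_or_ge j k with hlt | hge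
      · -- j < k: j is a border of s.take k, hence j ≤ maxB (s.take k) = pi[k-1]
        have : isBorder ((s.take q).take k) j := border_trans_down hb hj hlt
        rw [← htk] at this
        have : j ≤ maxB (s.take k) := le_maxB this
        exact hrec.2.2.2 j hj (by omega) hjc
      · -- j = k impossible: s[k] ≠ c but t[j] = c
        have hjk' : j = k := by omega
        subst hjk'
        rw [getD_take_eq hkq (by omega)] at hjc
        exact absurd hjc hne
    · rw [descend, if_neg hcond]
      push_neg at hcond
      refine ⟨le_refl _, hb, ?_, fun j _ hj _ => hj⟩
      rcases Nat.eq_zero_or_pos k with h0 | hp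
      · exact Or.inr h0
      · left
        have hkq : k < q := by have h := hb.1; rw [htlen] at h; omega
        rw [getD_take_eq hkq (by omega)]
        exact hcond hp

theorem take_succ_eq {s : List Char} {q : Nat} (h : q < s.length) :
    s.take (q + 1) = s.take q ++ [s.getD q ' '] := by
  rw [List.take_add_one, List.getElem?_eq_getElem h, List.getD_eq_getElem _ _ h]
  rfl

theorem maxB_step (s : List Char) (pi : List Nat) (q : Nat) (hq : 1 ≤ q) (hlt : q < s.length)
    (hpi : ∀ j, j < q → pi.getD j 0 = maxB (s.take (j + 1))) (k : Nat)
    (hk : k = maxB (s.take q)) :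
    (if s.getD q ' ' = s.getD (descend s pi (s.getD q ' ') k k) ' '
      then descend s pi (s.getD q ' ') k k + 1
      else descend s pi (s.getD q ' ') k k) = maxB (s.take (q + 1)) := by
  set c := s.getD q ' ' with hc
  set t := s.take q with ht
  set r := descend s pi c k k with hr
  have htlen : (List.take q s).length = q := by rw [List.length_take]; omega
  have htne : t ≠ [] := by
    intro hnil; rw [ht] at hnil; rw [hnil] at htlen; simp at htlen; omega
  obtain ⟨hrk, hrb, hrc, hrmax⟩ :=
    descend_spec s pi c q hq hlt.le hpi k k le_rfl (hk ▸ maxB_isBorder htne)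
  have hrq : r < q := by have := hrb.1; omega
  have hsr : s.getD r ' ' = t.getD r ' ' := (getD_take_eq hrq (by omega) ' ').symm
  have hts : s.take (q + 1) = t ++ [c] := take_succ_eq hlt
  have htcne : t ++ [c] ≠ [] := by simp
  rw [hts]
  by_cases h : c = s.getD r ' '
  · rw [if_pos h]
    have hup : r + 1 ≤ maxB (t ++ [c]) :=
      le_maxB (border_append.mpr ⟨hrb, by rw [← hsr, ← h]⟩)
    have hdown : maxB (t ++ [c]) ≤ r + 1 := by
      rcases Nat.eq_zero_or_pos (maxB (t ++ [c])) with h0 | hp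
      · omega
      · obtain ⟨j, hj⟩ : ∃ j, maxB (t ++ [c]) = j + 1 := ⟨maxB (t ++ [c]) - 1, by omega⟩
        obtain ⟨bj, hcj⟩ := border_append.mp (hj ▸ maxB_isBorder htcne)
        have := hrmax j bj (by rw [hk]; exact le_maxB bj) hcj
        omega
    omega
  · rw [if_neg h]
    have hr0 : r = 0 := by
      rcases hrc with hcc | h0
      · exact absurd (hsr.trans hcc).symm h
      · exact h0
    have : maxB (t ++ [c]) = 0 := by
      rcases Nat.eq_zero_or_pos (maxB (t ++ [c])) with h0 | hp
      · exact h0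
      · obtain ⟨j, hj⟩ : ∃ j, maxB (t ++ [c]) = j + 1 := ⟨maxB (t ++ [c]) - 1, by omega⟩
        obtain ⟨bj, hcj⟩ := border_append.mp (hj ▸ maxB_isBorder htcne)
        have hj0 : j = 0 := by
          have := hrmax j bj (by rw [hk]; exact le_maxB bj) hcj
          omega
        rw [hj0] at hcj
        rw [hr0] at hsr h
        exact absurd (hsr.trans hcj).symm h
    omega

theorem piLoop_inv (s : List Char) : ∀ n q (pi : List Nat) k, s.length - q = n →
    1 ≤ q → q ≤ s.length → pi.length = q →
    (∀ j, j < q → pi.getD j 0 = maxB (s.take (j + 1))) → k = maxB (s.take q) →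
    (piLoop s pi k q).length = s.length ∧
      ∀ j, j < s.length → (piLoop s pi k q).getD j 0 = maxB (s.take (j + 1)) := by
  intro n
  induction n with
  | zero =>
    intro q pi k hn hq hqs hlen hpi hk
    have hq' : q = s.length := by omega
    rw [piLoop, if_neg (by omega)]
    exact ⟨by omega, fun j hj => hpi j (by omega)⟩
  | succ n ih =>
    intro q pi k hn hq hqs hlen hpi hk
    have hlt : q < s.length := by omega
    rw [piLoop, if_pos hlt]
    have hstep := maxB_step s pi q hq hlt hpi k hk
    set k1 := descend s pi (s.getD q ' ') k k with hk1
    set k2 := if s.getD q ' ' = s.getD k1 ' ' then k1 + 1 else k1 with hk2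
    have hpi' : ∀ j, j < q + 1 → (pi ++ [k2]).getD j 0 = maxB (s.take (j + 1)) := by
      intro j hj
      rcases Nat.lt_or_ge j q with hjq | hjq
      · rw [List.getD_append pi [k2] 0 j (by omega)]
        exact hpi j hjq
      · have hjq' : j = q := by omega
        subst hjq'
        rw [List.getD_eq_getElem _ _ (by simp; omega), List.getElem_append_right (by omega)]
        simp [hlen, hstep]
    exact ih (q + 1) (pi ++ [k2]) k2 (by omega) (by omega) (by omega) (by simp [hlen]) hpi'
      hstep

theorem chainLoop_zero (pi : List Nat) (fuel : Nat) : chainLoop pi fuel 0 = 0 := by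
  cases fuel with
  | zero => rfl
  | succ n => rw [chainLoop, if_neg (by simp)]

theorem chainLoop_spec (s : List Char) (pi : List Nat)
    (hpi : ∀ j, j < s.length → pi.getD j 0 = maxB (s.take (j + 1))) :
    ∀ fuel k, k ≤ fuel → isBorder s k → 0 < k →
      isBorder s (chainLoop pi fuel k) ∧ 0 < chainLoop pi fuel k ∧
        ∀ j, isBorder s j → 0 < j → chainLoop pi fuel k ≤ j := by
  intro fuel
  induction fuel with
  | zero => intro k hk hb h0; omega
  | succ fuel ih =>
    intro k hk hb h0
    have hks : k < s.length := hb.1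
    have hpik : pi.getD (k - 1) 0 = maxB (s.take k) := by
      rw [hpi (k - 1) (by omega)]
      have he : k - 1 + 1 = k := by omega
      rw [he]
    have htklen : (s.take k).length = k := by rw [List.length_take]; omega
    have htkne : s.take k ≠ [] := by
      intro hnil; rw [hnil] at htklen; simp at htklen; omega
    by_cases hcond : 0 < k ∧ 0 < pi.getD (k - 1) 0
    · rw [chainLoop, if_pos hcond]
      have hmb : maxB (s.take k) < k := by have := maxB_lt htkne; omega
      have hb' : isBorder s (pi.getD (k - 1) 0) := by
        rw [hpik]
        exact border_trans_up hb (maxB_isBorder htkne)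
      exact ih (pi.getD (k - 1) 0) (by omega) hb' (by omega)
    · rw [chainLoop, if_neg hcond]
      refine ⟨hb, h0, ?_⟩
      intro j hj hj0
      by_contra hlt
      push_neg at hlt
      have hjb : isBorder (s.take k) j := border_trans_down hb hj hlt
      have : j ≤ maxB (s.take k) := le_maxB hjb
      have hpik0 : pi.getD (k - 1) 0 = 0 := by omega
      rw [hpik] at hpik0
      omega

theorem getD_drop_eq {l : List Char} {n p : Nat} (h : n + p < l.length) (d : Char) :
    (l.drop n).getD p d = l.getD (n + p) d := by
  rw [List.getD_eq_getElem _ _ (by rw [List.length_drop]; omega),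
      List.getD_eq_getElem _ _ h]
  exact List.getElem_drop

theorem getD_mem' {l : List Char} {n : Nat} (h : n < l.length) (d : Char) :
    l.getD n d ∈ l := by
  rw [List.getD_eq_getElem _ _ h]
  exact List.getElem_mem _

theorem bridge (a b : List Char) (hbsep : ('\x00' : Char) ∉ b)
    (hm : 0 < min a.length b.length) (i : Nat) (hi : 0 < i) :
    isBorder (b.take (min a.length b.length) ++ '\x00' :: a.drop (a.length - min a.length b.length)) i ↔
      i ≤ min a.length b.length ∧
        b.take i = a.drop (a.length - i) := by
  set m := min a.length b.length with hmdef
  set s := b.take m ++ '\x00' :: a.drop (a.length - m) with hsdef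
  have hma : m ≤ a.length := by omega
  have hmb : m ≤ b.length := by omega
  have hbt : (b.take m).length = m := by rw [List.length_take]; omega
  have had : (a.drop (a.length - m)).length = m := by rw [List.length_drop]; omega
  have hslen : s.length = m + 1 + m := by
    rw [hsdef]; simp [List.length_append, List.length_cons, hbt, had]; omega
  have htake : ∀ j, j ≤ m → s.take j = b.take j := by
    intro j hj
    rw [hsdef, List.take_append_of_le_length (by omega), List.take_take, min_eq_left hj]
  have hdrop : ∀ j, j ≤ m → s.drop (s.length - j) = a.drop (a.length - j) := by
    intro j hj
    rw [show s.length - j = (b.take m).length + (m + 1 - j) from by omega, hsdef,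
        List.drop_length_add_append,
        show m + 1 - j = (m - j) + 1 from by omega, List.drop_succ_cons, List.drop_drop]
    congr 1; omega
  have hsm : s.getD m ' ' = '\x00' := by
    rw [hsdef, List.getD_eq_getElem _ _ (by rw [← hsdef]; omega),
        List.getElem_append_right (by omega)]
    simp [hbt]
  constructor
  · rintro ⟨h1, h2⟩
    rw [hslen] at h1
    have him : i ≤ m := by
      by_contra hgt
      push_neg at hgt
      -- the separator lands inside the matched prefix: contradiction with '\x00' ∉ b
      have hp : i - m - 1 < m := by omega
      have c1 : (s.take i).getD (i - m - 1) ' ' = s.getD (i - m - 1) ' ' :=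
        getD_take_eq (by omega) (by omega) ' '
      have c2 : (s.drop (s.length - i)).getD (i - m - 1) ' ' =
          s.getD (s.length - i + (i - m - 1)) ' ' := getD_drop_eq (by omega) ' '
      have c3 := congrArg (fun l => l.getD (i - m - 1) ' ') h2
      simp only at c3
      have c4 : s.length - i + (i - m - 1) = m := by omega
      rw [c4] at c2
      have c5 : s.getD (i - m - 1) ' ' = '\x00' := by rw [← c1, c3, c2, hsm]
      have c6 : s.getD (i - m - 1) ' ' ∈ b := by
        rw [hsdef, List.getD_append _ _ _ _ (by omega), getD_take_eq hp (by omega) ' ']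
        exact getD_mem' (by omega) ' '
      rw [c5] at c6
      exact hbsep c6
    refine ⟨him, ?_⟩
    rw [← htake i him, ← hdrop i him]
    exact h2
  · rintro ⟨h1, h2⟩
    refine ⟨by omega, ?_⟩
    rw [htake i h1, hdrop i h1]
    exact h2

theorem minOverlap_spec (a b : List Char) (hbsep : ('\x00' : Char) ∉ b) :
    (minOverlap a b = 0 →
      ∀ i, 0 < i → i ≤ min a.length b.length → b.take i ≠ a.drop (a.length - i)) ∧
    (0 < minOverlap a b → minOverlap a b ≤ min a.length b.length ∧
      b.take (minOverlap a b) = a.drop (a.length - minOverlap a b) ∧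
      ∀ i, 0 < i → i ≤ min a.length b.length → b.take i = a.drop (a.length - i) →
        minOverlap a b ≤ i) := by
  by_cases hm : min a.length b.length = 0
  · constructor
    · intro _ i hi him
      omega
    · intro hpos
      rw [minOverlap] at hpos
      simp only [hm, if_pos] at hpos
      omega
  · have hm' : 0 < min a.length b.length := by omega
    set m := min a.length b.length with hmdef
    set s := b.take m ++ '\x00' :: a.drop (a.length - m) with hsdef
    have hbt : (b.take m).length = m := by rw [List.length_take]; omega
    have had : (a.drop (a.length - m)).length = m := by rw [List.length_drop]; omega
    have hslen : s.length = m + 1 + m := by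
      rw [hsdef]; simp [List.length_append, List.length_cons, hbt, had]; omega
    have hsne : s ≠ [] := by
      intro h; rw [h] at hslen; simp at hslen; omega
    have hmo : minOverlap a b =
        chainLoop (piLoop s [0] 0 1) ((piLoop s [0] 0 1).getD (s.length - 1) 0)
          ((piLoop s [0] 0 1).getD (s.length - 1) 0) := by
      rw [minOverlap]
      simp only [← hmdef, if_neg hm, ← hsdef]
    have htake1 : maxB (s.take 1) = 0 := by
      have : (s.take 1).length = 1 := by rw [List.length_take]; omega
      rw [maxB, this]
      exact Nat.findGreatest_zero
    obtain ⟨hplen, hpcorr⟩ := piLoop_inv s (s.length - 1) 1 [0] 0 rfl le_rfl (by omega) rfl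
      (by intro j hj; interval_cases j; simpa using htake1.symm) htake1.symm
    set pi := piLoop s [0] 0 1 with hpidef
    have hk0 : pi.getD (s.length - 1) 0 = maxB s := by
      rw [hpcorr (s.length - 1) (by omega)]
      rw [show s.length - 1 + 1 = s.length from by omega, List.take_length]
    rcases Nat.eq_zero_or_pos (maxB s) with hz | hp
    · have : minOverlap a b = 0 := by
        rw [hmo, hk0, hz, chainLoop_zero]
      constructor
      · intro _ i hi him heq
        have hbord : isBorder s i := (bridge a b hbsep hm' i hi).mpr ⟨him, heq⟩
        have := le_maxB hbord
        omega
      · intro hpos; omega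
    · have hb0 : isBorder s (maxB s) := maxB_isBorder hsne
      obtain ⟨hbr, hr0, hrmin⟩ := chainLoop_spec s pi hpcorr (maxB s) (maxB s) le_rfl hb0 hp
      have hmoval : minOverlap a b = chainLoop pi (maxB s) (maxB s) := by
        rw [hmo, hk0]
      constructor
      · intro h0; rw [hmoval] at h0; omega
      · intro _
        obtain ⟨hle, heq⟩ := (bridge a b hbsep hm' _ (hmoval ▸ hr0)).mp (hmoval ▸ hbr)
        refine ⟨hle, ?_, ?_⟩
        · exact heq
        · intro i hi him hieq
          have hbord : isBorder s i := (bridge a b hbsep hm' i hi).mpr ⟨him, hieq⟩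
          rw [hmoval]
          exact hrmin i hbord hi

theorem slice_cond_iff (a b : List Char) (i : Nat) (hi : 0 < i) :
    (PySem.List.slice a (some (-(i : Int))) none = PySem.List.slice b none (some (i : Int))) ↔
      b.take i = a.drop (a.length - i) := by
  rw [PySem.List.slice_from_neg_natCast a i hi, PySem.List.slice_to_natCast]
  exact eq_comm

theorem gmNone (a b : List Char)
    (h : ∀ j, 0 < j → j ≤ min a.length b.length → b.take j ≠ a.drop (a.length - j)) :
    ∀ n i, min a.length b.length + 1 - i = n → 0 < i → getMeshLoop a b i = [] := by
  intro n
  induction n with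
  | zero =>
    intro i hn hi
    rw [getMeshLoop, if_neg (by omega)]
  | succ n ih =>
    intro i hn hi
    by_cases hle : i ≤ min a.length b.length
    · rw [getMeshLoop, if_pos hle,
        if_neg (fun hc => h i hi hle ((slice_cond_iff a b i hi).mp hc))]
      exact ih (i + 1) (by omega) (by omega)
    · rw [getMeshLoop, if_neg hle]

theorem gmSome (a b : List Char) (r : Nat) (hr0 : 0 < r) (hrm : r ≤ min a.length b.length)
    (hreq : b.take r = a.drop (a.length - r))
    (hmin : ∀ j, 0 < j → j < r → b.take j ≠ a.drop (a.length - j)) :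
    ∀ n i, r - i = n → 0 < i → i ≤ r → getMeshLoop a b i = a.drop (a.length - r) := by
  intro n
  induction n with
  | zero =>
    intro i hn hi hir
    have hieq : i = r := by omega
    subst hieq
    rw [getMeshLoop, if_pos (by omega), if_pos ((slice_cond_iff a b i hi).mpr hreq),
        PySem.List.slice_from_neg_natCast a i hi]
  | succ n ih =>
    intro i hn hi hir
    have hilt : i < r := by omega
    rw [getMeshLoop, if_pos (by omega),
        if_neg (fun hc => hmin i hi hilt ((slice_cond_iff a b i hi).mp hc))]
    exact ih (i + 1) (by omega) (by omega) (by omega)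

theorem meshA_eq (a b : List Char) (hbsep : ('\x00' : Char) ∉ b) :
    getMeshA a b = if minOverlap a b = 0 then [] else b.take (minOverlap a b) := by
  obtain ⟨hz, hp⟩ := minOverlap_spec a b hbsep
  by_cases h : minOverlap a b = 0
  · rw [if_pos h]
    exact gmNone a b (fun j hj hjm => hz h j hj hjm) _ 1 rfl (by omega)
  · rw [if_neg h]
    unfold getMeshA
    obtain ⟨hle, heq, hmin⟩ := hp (by omega)
    rw [gmSome a b (minOverlap a b) (by omega) hle heq
      (fun j hj hjr hjeq => absurd (hmin j hj (by omega) hjeq) (by omega)) _ 1 rfl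
      (by omega) (by omega)]
    exact heq.symm

def wmPairs : List (List Char × List Char) → List Char → List Char
  | [], ans => ans
  | (a, b) :: rest, ans =>
    let mesh := getMeshA a b
    if mesh = [] then "failed to mesh".toList
    else wmPairs rest (ans ++ mesh)

theorem wmLoopA_eq (ws : List (List Char)) :
    ∀ n i ans, ws.length - 1 - i = n →
      wmLoopA ws i ans = wmPairs ((ws.zip ws.tail).drop i) ans := by
  intro n
  induction n with
  | zero =>
    intro i ans hn
    rw [wmLoopA, if_neg (by omega)]
    rw [List.drop_eq_nil_of_le (by rw [List.length_zip, List.length_tail]; omega), wmPairs]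
  | succ n ih =>
    intro i ans hn
    have hi : i < ws.length - 1 := by omega
    have hzlen : i < (ws.zip ws.tail).length := by
      rw [List.length_zip, List.length_tail]; omega
    rw [wmLoopA, if_pos hi, List.drop_eq_getElem_cons hzlen, wmPairs]
    have hget : (ws.zip ws.tail)[i] = (ws[i]'(by omega), ws[i + 1]'(by omega)) := by
      rw [List.getElem_zip]
      congr 1
      exact List.getElem_tail _
    rw [hget]
    simp only
    rw [List.getD_eq_getElem _ _ (by omega), List.getD_eq_getElem _ _ (by omega)]
    by_cases hm : getMeshA (ws[i]'(by omega)) (ws[i + 1]'(by omega)) = []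
    · rw [if_pos hm, if_pos hm]
    · rw [if_neg hm, if_neg hm]
      exact ih (i + 1) _ (by omega)

theorem wmPairs_eq (ps : List (List Char × List Char))
    (hsep : ∀ p ∈ ps, ('\x00' : Char) ∉ p.2) :
    ∀ parts, wmPairs ps parts.flatten = wmAltLoop ps parts := by
  induction ps with
  | nil => intro parts; rw [wmPairs, wmAltLoop]
  | cons p rest ih =>
    intro parts
    obtain ⟨a, b⟩ := p
    have hbsep : ('\x00' : Char) ∉ b := hsep (a, b) (List.mem_cons_self ..)
    rw [wmPairs, wmAltLoop]
    rw [meshA_eq a b hbsep]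
    by_cases h : minOverlap a b = 0
    · rw [if_pos h, if_pos h, if_pos rfl]
    · rw [if_neg h]
      have hkb : minOverlap a b ≤ b.length := by
        obtain ⟨hle, _, _⟩ := (minOverlap_spec a b hbsep).2 (by omega)
        omega
      have hne : b.take (minOverlap a b) ≠ [] := by
        intro hnil
        have := congrArg List.length hnil
        rw [List.length_take] at this
        simp only [List.length_nil] at this
        omega
      rw [if_neg hne, if_neg h]
      have hflat : parts.flatten ++ b.take (minOverlap a b) =
          (parts ++ [b.take (minOverlap a b)]).flatten := by
        rw [List.flatten_append, List.flatten_cons, List.flatten_nil, List.append_nil]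
      rw [hflat]
      exact ih (fun q hq => hsep q (List.mem_cons_of_mem _ hq)) _

theorem word_mesh_eq (words : List String) (hdom : Dom_word_mesh words) :
    word_mesh words = word_mesh_alt words := by
  rw [word_mesh, word_mesh_alt]
  congr 1
  rw [wmLoopA_eq (words.map String.toList) _ 0 [] rfl, List.drop_zero]
  have hsep : ∀ p ∈ (words.map String.toList).zip (words.map String.toList).tail,
      ('\x00' : Char) ∉ p.2 := by
    intro p hp hmem
    have hp2 : p.2 ∈ (words.map String.toList).tail := by
      obtain ⟨x, y⟩ := p
      exact (List.of_mem_zip hp).2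
    have hp2' : p.2 ∈ words.map String.toList := List.mem_of_mem_tail hp2
    obtain ⟨w, hw, hwp⟩ := List.mem_map.mp hp2'
    rw [Dom_word_mesh, List.all_eq_true] at hdom
    have := hdom w hw
    rw [pvDomStr, List.all_eq_true] at this
    have hchar := this '\x00' (by rw [hwp]; exact hmem)
    simp [pvDomChar] at hchar
  have := wmPairs_eq _ hsep []
  rw [List.flatten_nil] at this
  exact this

-- ===== VERDICT (by name: the statement is the Claim_ definition above) =====
theorem word_mesh_spec : Claim_equal_word_mesh :=
  fun words hdom => word_mesh_eq words hdom
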